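-- pv_equiv track=rewrite | github.com/fish-and-bear/lexicon-gnn-ph | .history/backend/old_dictionary_manager_20250216212107.py | standardize_entry_pos
-- ===== SOURCE A (Python) =====
-- from typing import Optional, List, Tuple, Dict, Any, Set, Callable
--
-- POS_MAPPING = {
--     'noun': {'en': 'Noun', 'tl': 'Pangngalan', 'abbreviations': ['n', 'png'], 'variants': []},
--     'adjective': {'en': 'Adjective', 'tl': 'Pang-uri', 'abbreviations': ['adj', 'pnr'], 'variants': []},
--     'verb': {'en': 'Verb', 'tl': 'Pandiwa', 'abbreviations': ['v', 'pnw'], 'variants': []},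
--     'adverb': {'en': 'Adverb', 'tl': 'Pang-abay', 'abbreviations': ['adv', 'pny'], 'variants': []},
--     'pronoun': {'en': 'Pronoun', 'tl': 'Panghalip', 'abbreviations': ['pron'], 'variants': []},
--     'preposition': {'en': 'Preposition', 'tl': 'Pang-ukol', 'abbreviations': ['prep'], 'variants': []},
--     'conjunction': {'en': 'Conjunction', 'tl': 'Pangatnig', 'abbreviations': ['conj'], 'variants': []},
--     'interjection': {'en': 'Interjection', 'tl': 'Pandamdam', 'abbreviations': ['intj'], 'variants': []},
--     'affix': {'en': 'Affix', 'tl': 'Panlapi', 'abbreviations': ['affix', 'pnl'], 'variants': []},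
--     'idiom': {'en': 'Idiom', 'tl': 'Idyoma', 'abbreviations': ['idm'], 'variants': []},
--     'colloquial': {'en': 'Colloquial', 'tl': 'Kolokyal', 'abbreviations': ['col'], 'variants': []},
--     'synonym': {'en': 'Synonym', 'tl': 'Singkahulugan', 'abbreviations': ['syn'], 'variants': []},
--     'antonym': {'en': 'Antonym', 'tl': 'Di-kasingkahulugan', 'abbreviations': ['ant'], 'variants': []},
--     'english': {'en': 'English', 'tl': 'Ingles', 'abbreviations': ['eng'], 'variants': []},
--     'spanish': {'en': 'Spanish', 'tl': 'Espanyol', 'abbreviations': ['spa'], 'variants': []},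
--     'texting': {'en': 'Texting', 'tl': 'Texting', 'abbreviations': ['tx'], 'variants': []},
--     'variant': {'en': 'Variant', 'tl': 'Varyant', 'abbreviations': ['var'], 'variants': []},
--     'uncategorized': {'en': 'Uncategorized', 'tl': 'Hindi Tiyak', 'abbreviations': ['unc'], 'variants': []}
-- }
--
-- def standardize_pos(pos: str) -> str:
--     if not pos:
--         return ""
--     pos_lower = pos.lower().strip()
--     for key, mapping in POS_MAPPING.items():
--         if pos_lower in {mapping['en'].lower(), mapping['tl'].lower(), key.lower()} or \
--            pos_lower in {abbr.lower().strip('.') for abbr in mapping['abbreviations']} or \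
--            pos_lower in {var.lower() for var in mapping['variants']}:
--             return mapping['tl']
--     return pos
--
-- def standardize_entry_pos(pos_str: str) -> List[str]:
--     if not pos_str:
--         return ['Hindi Tiyak']
--     pos_parts = pos_str.lower().strip().split()
--     standardized = []
--     direct_map = {
--         'png': 'Pangngalan',
--         'pnr': 'Pang-uri',
--         'pnw': 'Pandiwa',
--         'pny': 'Pang-abay',
--         'pnd': 'Pangngalan',
--         'adj': 'Pang-uri',
--         'n': 'Pangngalan',
--         'v': 'Pandiwa'
--     }
--     for pos_part in pos_parts:
--         pos_clean = pos_part.strip(' .')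
--         if pos_clean in direct_map:
--             standardized.append(direct_map[pos_clean])
--             continue
--         standardized.append(standardize_pos(pos_clean))
--     if not standardized:
--         standardized = ['Hindi Tiyak']
--     return list(dict.fromkeys(standardized))
-- ===== SOURCE B (Python) =====
-- # B: one flat precomputed lookup table (token -> Tagalog label) replaces the per-token
-- # scan over POS_MAPPING; each token becomes a single dict lookup.
-- _POS_LOOKUP = {
--     # POS_MAPPING keys / English / Tagalog names / abbreviations, flattened (first match wins),
--     # then the direct abbreviation map overlaid.
--     'noun': 'Pangngalan', 'pangngalan': 'Pangngalan', 'png': 'Pangngalan',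
--     'adjective': 'Pang-uri', 'pang-uri': 'Pang-uri', 'pnr': 'Pang-uri',
--     'verb': 'Pandiwa', 'pandiwa': 'Pandiwa', 'pnw': 'Pandiwa',
--     'adverb': 'Pang-abay', 'pang-abay': 'Pang-abay', 'pny': 'Pang-abay',
--     'pronoun': 'Panghalip', 'panghalip': 'Panghalip', 'pron': 'Panghalip',
--     'preposition': 'Pang-ukol', 'pang-ukol': 'Pang-ukol', 'prep': 'Pang-ukol',
--     'conjunction': 'Pangatnig', 'pangatnig': 'Pangatnig', 'conj': 'Pangatnig',
--     'interjection': 'Pandamdam', 'pandamdam': 'Pandamdam', 'intj': 'Pandamdam',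
--     'affix': 'Panlapi', 'panlapi': 'Panlapi', 'pnl': 'Panlapi',
--     'idiom': 'Idyoma', 'idyoma': 'Idyoma', 'idm': 'Idyoma',
--     'colloquial': 'Kolokyal', 'kolokyal': 'Kolokyal', 'col': 'Kolokyal',
--     'synonym': 'Singkahulugan', 'singkahulugan': 'Singkahulugan', 'syn': 'Singkahulugan',
--     'antonym': 'Di-kasingkahulugan', 'di-kasingkahulugan': 'Di-kasingkahulugan', 'ant': 'Di-kasingkahulugan',
--     'english': 'Ingles', 'ingles': 'Ingles', 'eng': 'Ingles',
--     'spanish': 'Espanyol', 'espanyol': 'Espanyol', 'spa': 'Espanyol',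
--     'texting': 'Texting', 'tx': 'Texting',
--     'variant': 'Varyant', 'varyant': 'Varyant', 'var': 'Varyant',
--     'uncategorized': 'Hindi Tiyak', 'hindi tiyak': 'Hindi Tiyak', 'unc': 'Hindi Tiyak',
--     'n': 'Pangngalan', 'adj': 'Pang-uri', 'v': 'Pandiwa', 'adv': 'Pang-abay',
--     'pnd': 'Pangngalan',
-- }
--
-- def standardize_entry_pos(pos_str):
--     if not pos_str:
--         return ['Hindi Tiyak']
--     tokens = pos_str.lower().strip().split()
--     if not tokens:
--         return ['Hindi Tiyak']
--     cleaned = (t.strip(' .') for t in tokens)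
--     return list(dict.fromkeys(_POS_LOOKUP.get(t, t) for t in cleaned))
-- ===== Notes on version B (the rewrite author's own statement) =====
-- stated objective: simpler
-- what changed: A's per-token linear scan over POS_MAPPING (with per-entry set construction) plus a separate direct_map check is replaced by a single precomputed flat dict mapping every recognized token to its Tagalog label, so each token is one dict lookup.
import Mathlib
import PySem

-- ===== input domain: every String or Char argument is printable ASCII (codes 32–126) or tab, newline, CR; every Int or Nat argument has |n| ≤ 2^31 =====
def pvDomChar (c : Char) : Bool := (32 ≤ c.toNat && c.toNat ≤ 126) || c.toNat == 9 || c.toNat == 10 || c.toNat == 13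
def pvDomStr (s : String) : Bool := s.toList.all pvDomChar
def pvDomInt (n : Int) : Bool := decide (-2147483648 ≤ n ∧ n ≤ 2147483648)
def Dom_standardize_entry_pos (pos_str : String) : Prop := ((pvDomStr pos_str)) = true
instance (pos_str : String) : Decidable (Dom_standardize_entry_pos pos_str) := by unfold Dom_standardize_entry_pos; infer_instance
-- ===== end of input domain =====

set_option maxRecDepth 16384
set_option maxHeartbeats 1000000

-- B replaces A's per-token scan over POS_MAPPING by one precomputed flat lookup table (objective: simpler).

-- ===== PORT A =====
structure PosEntry where
  key : String
  en : String
  tl : String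
  abbreviations : List String
  variants : List String
deriving DecidableEq, Repr

def POS_MAPPING : List PosEntry := [
  ⟨"noun", "Noun", "Pangngalan", ["n", "png"], []⟩,
  ⟨"adjective", "Adjective", "Pang-uri", ["adj", "pnr"], []⟩,
  ⟨"verb", "Verb", "Pandiwa", ["v", "pnw"], []⟩,
  ⟨"adverb", "Adverb", "Pang-abay", ["adv", "pny"], []⟩,
  ⟨"pronoun", "Pronoun", "Panghalip", ["pron"], []⟩,
  ⟨"preposition", "Preposition", "Pang-ukol", ["prep"], []⟩,
  ⟨"conjunction", "Conjunction", "Pangatnig", ["conj"], []⟩,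
  ⟨"interjection", "Interjection", "Pandamdam", ["intj"], []⟩,
  ⟨"affix", "Affix", "Panlapi", ["affix", "pnl"], []⟩,
  ⟨"idiom", "Idiom", "Idyoma", ["idm"], []⟩,
  ⟨"colloquial", "Colloquial", "Kolokyal", ["col"], []⟩,
  ⟨"synonym", "Synonym", "Singkahulugan", ["syn"], []⟩,
  ⟨"antonym", "Antonym", "Di-kasingkahulugan", ["ant"], []⟩,
  ⟨"english", "English", "Ingles", ["eng"], []⟩,
  ⟨"spanish", "Spanish", "Espanyol", ["spa"], []⟩,
  ⟨"texting", "Texting", "Texting", ["tx"], []⟩,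
  ⟨"variant", "Variant", "Varyant", ["var"], []⟩,
  ⟨"uncategorized", "Uncategorized", "Hindi Tiyak", ["unc"], []⟩
]

def standardize_pos (pos : String) : String :=
  if pos = "" then ""
  else
    let pos_lower := PySem.Str.strip (PySem.Str.lower pos)
    match POS_MAPPING.find? (fun m =>
      ([PySem.Str.lower m.en, PySem.Str.lower m.tl, PySem.Str.lower m.key].contains pos_lower
        || (m.abbreviations.map (fun abbr => PySem.Str.stripChars (PySem.Str.lower abbr) ".")).contains pos_lower
        || (m.variants.map (fun v => PySem.Str.lower v)).contains pos_lower)) with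
    | some m => m.tl
    | none => pos

def directMap : PySem.Dict String String := PySem.Dict.ofList
  [("png", "Pangngalan"), ("pnr", "Pang-uri"), ("pnw", "Pandiwa"), ("pny", "Pang-abay"),
   ("pnd", "Pangngalan"), ("adj", "Pang-uri"), ("n", "Pangngalan"), ("v", "Pandiwa")]

def standardize_entry_pos (pos_str : String) : List String :=
  if pos_str = "" then ["Hindi Tiyak"]
  else
    let pos_parts := PySem.Str.split₀ (PySem.Str.strip (PySem.Str.lower pos_str))
    let standardized := pos_parts.foldl (fun acc pos_part =>
      acc ++ [let pos_clean := PySem.Str.stripChars pos_part " ."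
              match directMap.get? pos_clean with
              | some v => v
              | none => standardize_pos pos_clean]) []
    let standardized := if standardized = [] then ["Hindi Tiyak"] else standardized
    PySem.List.dedup standardized

-- ===== PORT B =====
def POS_LOOKUP : PySem.Dict String String := PySem.Dict.ofList [
  ("noun", "Pangngalan"),
  ("pangngalan", "Pangngalan"),
  ("png", "Pangngalan"),
  ("adjective", "Pang-uri"),
  ("pang-uri", "Pang-uri"),
  ("pnr", "Pang-uri"),
  ("verb", "Pandiwa"),
  ("pandiwa", "Pandiwa"),
  ("pnw", "Pandiwa"),
  ("adverb", "Pang-abay"),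
  ("pang-abay", "Pang-abay"),
  ("pny", "Pang-abay"),
  ("pronoun", "Panghalip"),
  ("panghalip", "Panghalip"),
  ("pron", "Panghalip"),
  ("preposition", "Pang-ukol"),
  ("pang-ukol", "Pang-ukol"),
  ("prep", "Pang-ukol"),
  ("conjunction", "Pangatnig"),
  ("pangatnig", "Pangatnig"),
  ("conj", "Pangatnig"),
  ("interjection", "Pandamdam"),
  ("pandamdam", "Pandamdam"),
  ("intj", "Pandamdam"),
  ("affix", "Panlapi"),
  ("panlapi", "Panlapi"),
  ("pnl", "Panlapi"),
  ("idiom", "Idyoma"),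
  ("idyoma", "Idyoma"),
  ("idm", "Idyoma"),
  ("colloquial", "Kolokyal"),
  ("kolokyal", "Kolokyal"),
  ("col", "Kolokyal"),
  ("synonym", "Singkahulugan"),
  ("singkahulugan", "Singkahulugan"),
  ("syn", "Singkahulugan"),
  ("antonym", "Di-kasingkahulugan"),
  ("di-kasingkahulugan", "Di-kasingkahulugan"),
  ("ant", "Di-kasingkahulugan"),
  ("english", "Ingles"),
  ("ingles", "Ingles"),
  ("eng", "Ingles"),
  ("spanish", "Espanyol"),
  ("espanyol", "Espanyol"),
  ("spa", "Espanyol"),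
  ("texting", "Texting"),
  ("tx", "Texting"),
  ("variant", "Varyant"),
  ("varyant", "Varyant"),
  ("var", "Varyant"),
  ("uncategorized", "Hindi Tiyak"),
  ("hindi tiyak", "Hindi Tiyak"),
  ("unc", "Hindi Tiyak"),
  ("n", "Pangngalan"),
  ("adj", "Pang-uri"),
  ("v", "Pandiwa"),
  ("adv", "Pang-abay"),
  ("pnd", "Pangngalan")
]

def standardize_entry_pos_alt (pos_str : String) : List String :=
  if pos_str = "" then ["Hindi Tiyak"]
  else
    let tokens := PySem.Str.split₀ (PySem.Str.strip (PySem.Str.lower pos_str))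
    if tokens = [] then ["Hindi Tiyak"]
    else
      let cleaned := tokens.map (fun t => PySem.Str.stripChars t " .")
      PySem.List.dedup (cleaned.map (fun t => POS_LOOKUP.getD t t))

-- ===== PRECONDITION & SPEC =====
def Spec_standardize_entry_pos (pos_str : String) (out : List String) : Prop := out = standardize_entry_pos_alt pos_str
instance (pos_str : String) (out : List String) : Decidable (Spec_standardize_entry_pos pos_str out) := by unfold Spec_standardize_entry_pos; infer_instance

-- ===== CLAIM (what is proved, stated in full; the proofs are below) =====
def Claim_equal_standardize_entry_pos : Prop := ∀ (pos_str : String), Dom_standardize_entry_pos pos_str → Spec_standardize_entry_pos pos_str (standardize_entry_pos pos_str)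

-- ===== LEMMAS AND PROOFS =====

-- the per-token computation of A (the bracketed body of its loop)
def tokA (c : String) : String :=
  match directMap.get? c with
  | some v => v
  | none => standardize_pos c

-- the keys of POS_LOOKUP, as a plain list
def flatKeysList : List String := ["noun", "pangngalan", "png", "adjective", "pang-uri", "pnr", "verb", "pandiwa", "pnw", "adverb", "pang-abay", "pny", "pronoun", "panghalip", "pron", "preposition", "pang-ukol", "prep", "conjunction", "pangatnig", "conj", "interjection", "pandamdam", "intj", "affix", "panlapi", "pnl", "idiom", "idyoma", "idm", "colloquial", "kolokyal", "col", "synonym", "singkahulugan", "syn", "antonym", "di-kasingkahulugan", "ant", "english", "ingles", "eng", "spanish", "espanyol", "spa", "texting", "tx", "variant", "varyant", "var", "uncategorized", "hindi tiyak", "unc", "n", "adj", "v", "adv", "pnd"]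

theorem pvToNat_ofNat (n : Nat) (h : n < 55296) : (Char.ofNat n).toNat = n := by
  rw [Char.toNat_ofNat, if_pos (Or.inl h)]

theorem pvIsupper_iff (c : Char) : PySem.Chars.isupper c = true ↔ (65 ≤ c.toNat ∧ c.toNat ≤ 90) := by
  unfold PySem.Chars.isupper
  simp only [Bool.and_eq_true, decide_eq_true_eq]
  exact Iff.rfl

theorem lowerChar_idem (c : Char) :
    PySem.Chars.lowerChar (PySem.Chars.lowerChar c) = PySem.Chars.lowerChar c := by
  unfold PySem.Chars.lowerChar
  by_cases h : PySem.Chars.isupper c = true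
  · obtain ⟨h65, h90⟩ := (pvIsupper_iff c).mp h
    have ht : (Char.ofNat (c.toNat + 32)).toNat = c.toNat + 32 := pvToNat_ofNat _ (by omega)
    rw [if_pos h, if_neg]
    intro hu
    obtain ⟨a, b⟩ := (pvIsupper_iff _).mp hu
    omega
  · rw [if_neg h, if_neg h]

theorem dropWhile_isspace_self (l : List Char) (h : ∀ c ∈ l, PySem.Chars.isspace c = false) :
    l.dropWhile PySem.Chars.isspace = l := by
  cases l with
  | nil => rfl
  | cons a as => rw [List.dropWhile_cons, if_neg (by simp [h a List.mem_cons_self])]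

theorem chars_strip_self (l : List Char) (h : ∀ c ∈ l, PySem.Chars.isspace c = false) :
    PySem.Chars.strip l = l := by
  unfold PySem.Chars.strip PySem.Chars.lstrip PySem.Chars.rstrip
  rw [dropWhile_isspace_self l h,
      dropWhile_isspace_self l.reverse (fun c hc => h c (List.mem_reverse.mp hc)),
      List.reverse_reverse]

theorem chars_lower_self (l : List Char) (h : ∀ c ∈ l, PySem.Chars.lowerChar c = c) :
    PySem.Chars.lower l = l := by
  unfold PySem.Chars.lower
  rw [List.map_congr_left h]
  exact List.map_id' l

theorem strip_lower_self (c : String)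
    (hlow : ∀ ch ∈ c.toList, PySem.Chars.lowerChar ch = ch)
    (hsp : ∀ ch ∈ c.toList, PySem.Chars.isspace ch = false) :
    PySem.Str.strip (PySem.Str.lower c) = c := by
  apply String.toList_inj.mp
  rw [PySem.Str.toList_strip, PySem.Str.toList_lower, chars_lower_self _ hlow, chars_strip_self _ hsp]

theorem mem_stripChars {c : Char} {s chars : List Char}
    (h : c ∈ PySem.Chars.stripChars s chars) : c ∈ s := by
  unfold PySem.Chars.stripChars at h
  rw [List.mem_reverse] at h
  have h1 := (List.dropWhile_sublist _).subset h
  rw [List.mem_reverse] at h1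
  exact (List.dropWhile_sublist _).subset h1

theorem mem_strip {c : Char} {s : List Char} (h : c ∈ PySem.Chars.strip s) : c ∈ s := by
  unfold PySem.Chars.strip PySem.Chars.lstrip PySem.Chars.rstrip at h
  rw [List.mem_reverse] at h
  have h1 := (List.dropWhile_sublist _).subset h
  rw [List.mem_reverse] at h1
  exact (List.dropWhile_sublist _).subset h1

-- every character of every token of split₀ satisfies P and is not whitespace,
-- provided every non-whitespace character of the input satisfies P
theorem split₀_go_chars (P : Char → Prop) (l : List Char) :
    ∀ (cur : List Char) (acc : List (List Char)),
    (∀ c ∈ l, PySem.Chars.isspace c = false → P c) →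
    (∀ c ∈ cur, P c ∧ PySem.Chars.isspace c = false) →
    (∀ t ∈ acc, ∀ c ∈ t, P c ∧ PySem.Chars.isspace c = false) →
    ∀ t ∈ PySem.Chars.split₀.go l cur acc, ∀ c ∈ t, P c ∧ PySem.Chars.isspace c = false := by
  induction l with
  | nil =>
    intro cur acc _ hcur hacc t ht
    unfold PySem.Chars.split₀.go at ht
    by_cases hc : cur.isEmpty
    · rw [if_pos hc] at ht
      exact hacc t (List.mem_reverse.mp ht)
    · rw [if_neg hc, List.mem_reverse, List.mem_cons] at ht
      rcases ht with rfl | ht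
      · intro c hc2
        exact hcur c (List.mem_reverse.mp hc2)
      · exact hacc t ht
  | cons a rest ih =>
    intro cur acc hl hcur hacc t ht
    unfold PySem.Chars.split₀.go at ht
    by_cases hs : PySem.Chars.isspace a = true
    · rw [if_pos hs] at ht
      by_cases hc : cur.isEmpty
      · rw [if_pos hc] at ht
        exact ih [] acc (fun c hc2 => hl c (List.mem_cons_of_mem a hc2)) (by simp) hacc t ht
      · rw [if_neg hc] at ht
        refine ih [] _ (fun c hc2 => hl c (List.mem_cons_of_mem a hc2)) (by simp) ?_ t ht
        intro t' ht' c hc2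
        rw [List.mem_cons] at ht'
        rcases ht' with rfl | ht'
        · exact hcur c (List.mem_reverse.mp hc2)
        · exact hacc t' ht' c hc2
    · rw [if_neg hs] at ht
      refine ih (a :: cur) acc (fun c hc2 => hl c (List.mem_cons_of_mem a hc2)) ?_ hacc t ht
      intro c hc2
      rw [List.mem_cons] at hc2
      rcases hc2 with rfl | hc2
      · exact ⟨hl c List.mem_cons_self (by simpa using hs), by simpa using hs⟩
      · exact hcur c hc2

theorem split₀_chars (P : Char → Prop) (l : List Char)
    (hl : ∀ c ∈ l, PySem.Chars.isspace c = false → P c) :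
    ∀ t ∈ PySem.Chars.split₀ l, ∀ c ∈ t, P c ∧ PySem.Chars.isspace c = false := by
  unfold PySem.Chars.split₀
  exact split₀_go_chars P l [] [] hl (by simp) (by simp)

-- A's per-token result equals B's lookup, for every recognized key (one big computation)
theorem tokA_key : ∀ c ∈ flatKeysList, tokA c = POS_LOOKUP.getD c c := by decide

theorem pos_lookup_keys : POS_LOOKUP.keys = flatKeysList := by decide

theorem tokA_eq (c : String)
    (hlow : ∀ ch ∈ c.toList, PySem.Chars.lowerChar ch = ch)
    (hsp : ∀ ch ∈ c.toList, PySem.Chars.isspace ch = false) :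
    tokA c = POS_LOOKUP.getD c c := by
  by_cases hmem : c ∈ flatKeysList
  · exact tokA_key c hmem
  · have hgetD : POS_LOOKUP.getD c c = c := by
      unfold PySem.Dict.getD
      rw [(PySem.Dict.get?_eq_none_iff_not_mem_keys POS_LOOKUP c).mpr (pos_lookup_keys ▸ hmem)]
      rfl
    have hd : directMap.get? c = none :=
      (PySem.Dict.get?_eq_none_iff_not_mem_keys directMap c).mpr
        (fun h => hmem ((by decide : directMap.keys ⊆ flatKeysList) h))
    rw [hgetD]
    unfold tokA
    rw [hd]
    unfold standardize_pos
    by_cases hce : c = ""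
    · simp [hce]
    · rw [if_neg hce]
      simp only [strip_lower_self c hlow hsp]
      rw [List.find?_eq_none.mpr ?_]
      intro m hm
      fin_cases hm <;>
      · intro hp
        rw [Bool.or_eq_true, Bool.or_eq_true] at hp
        rcases hp with (h | h) | h <;>
          exact hmem ((by decide : _ ⊆ flatKeysList) (List.mem_of_elem_eq_true h))

-- ===== VERDICT (by name: the statement is the Claim_ definition above) =====
theorem standardize_entry_pos_spec : Claim_equal_standardize_entry_pos := by
  intro pos_str _
  unfold Spec_standardize_entry_pos
  by_cases h0 : pos_str = ""
  · simp only [standardize_entry_pos, standardize_entry_pos_alt, if_pos h0]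
  · simp only [standardize_entry_pos, standardize_entry_pos_alt, if_neg h0]
    have htok : ∀ t ∈ PySem.Str.split₀ (PySem.Str.strip (PySem.Str.lower pos_str)),
        tokA (PySem.Str.stripChars t " .") =
          POS_LOOKUP.getD (PySem.Str.stripChars t " .") (PySem.Str.stripChars t " .") := by
      intro t ht
      have hchars : ∀ c ∈ t.toList,
          PySem.Chars.lowerChar c = c ∧ PySem.Chars.isspace c = false := by
        have hmem : t.toList ∈ PySem.Chars.split₀ (PySem.Chars.strip (PySem.Chars.lower pos_str.toList)) := by
          have hb := PySem.Str.split₀_map_toList (PySem.Str.strip (PySem.Str.lower pos_str))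
          rw [PySem.Str.toList_strip, PySem.Str.toList_lower] at hb
          rw [← hb]
          exact List.mem_map_of_mem ht
        refine split₀_chars _ _ ?_ t.toList hmem
        intro c hc _
        have hmem2 : c ∈ PySem.Chars.lower pos_str.toList := mem_strip hc
        unfold PySem.Chars.lower at hmem2
        obtain ⟨d, _, rfl⟩ := List.mem_map.mp hmem2
        exact lowerChar_idem d
      have hlow : ∀ ch ∈ (PySem.Str.stripChars t " .").toList, PySem.Chars.lowerChar ch = ch := by
        intro ch hch
        rw [PySem.Str.toList_stripChars] at hch
        exact (hchars ch (mem_stripChars hch)).1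
      have hsp : ∀ ch ∈ (PySem.Str.stripChars t " .").toList, PySem.Chars.isspace ch = false := by
        intro ch hch
        rw [PySem.Str.toList_stripChars] at hch
        exact (hchars ch (mem_stripChars hch)).2
      exact tokA_eq _ hlow hsp
    generalize PySem.Str.split₀ (PySem.Str.strip (PySem.Str.lower pos_str)) = toks at htok ⊢
    have hfold : List.foldl
        (fun acc pos_part =>
          acc ++
            [match directMap.get? (PySem.Str.stripChars pos_part " .") with
              | some v => v
              | none => standardize_pos (PySem.Str.stripChars pos_part " .")])
        [] toks =
        [] ++ List.map
          (fun pos_part =>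
            match directMap.get? (PySem.Str.stripChars pos_part " .") with
            | some v => v
            | none => standardize_pos (PySem.Str.stripChars pos_part " .")) toks :=
      PySem.List.foldl_append_singleton_eq_map _ toks []
    rw [List.nil_append] at hfold
    rw [hfold]
    cases toks with
    | nil => rfl
    | cons a as =>
      rw [if_neg (by simp), if_neg (by simp), List.map_map]
      exact congrArg PySem.List.dedup (List.map_congr_left (fun t ht => htok t ht))
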